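-- pv_equiv track=rewrite | github.com/rakshityadavabi/vilc-analysis | app/components/report_charts.py | _ordered_labels
-- ===== SOURCE A (Python) =====
-- def _ordered_labels(labels: list[str], preferred_order: list[str] | None = None, strict: bool = False) -> list[str]:
--     ordered: list[str] = []
--     preferred = preferred_order or []
--     for value in preferred:
--         if value in labels and value not in ordered:
--             ordered.append(value)
--     if not strict:
--         for value in labels:
--             if value not in ordered:
--                 ordered.append(value)
--     return ordered
-- ===== SOURCE B (Python) =====
-- def _ordered_labels(labels: list[str], preferred_order: list[str] | None = None, strict: bool = False) -> list[str]:
--     preferred = preferred_order or []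
--     rank = {}
--     for i, v in enumerate(preferred):
--         if v not in rank:
--             rank[v] = i
--     first = {}
--     for i, v in enumerate(labels):
--         if v not in first:
--             first[v] = i
--     P, n = len(preferred), len(labels)
--     candidates = [v for v in first if not strict or v in rank]
--     # sort key = lexicographic (rank-or-P, first occurrence) encoded as one integer (first[v] < n)
--     return sorted(candidates, key=lambda v: rank.get(v, P) * n + first[v])
-- ===== Notes on version B (the rewrite author's own statement) =====
-- stated objective: faster
-- what changed: Replaces A's two loops with repeated 'in labels'/'in ordered' list scans by building first-occurrence index dicts for preferred_order and labels once, then sorting the unique labels by an encoded (preferred-rank, first-occurrence) key.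
import Mathlib
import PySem

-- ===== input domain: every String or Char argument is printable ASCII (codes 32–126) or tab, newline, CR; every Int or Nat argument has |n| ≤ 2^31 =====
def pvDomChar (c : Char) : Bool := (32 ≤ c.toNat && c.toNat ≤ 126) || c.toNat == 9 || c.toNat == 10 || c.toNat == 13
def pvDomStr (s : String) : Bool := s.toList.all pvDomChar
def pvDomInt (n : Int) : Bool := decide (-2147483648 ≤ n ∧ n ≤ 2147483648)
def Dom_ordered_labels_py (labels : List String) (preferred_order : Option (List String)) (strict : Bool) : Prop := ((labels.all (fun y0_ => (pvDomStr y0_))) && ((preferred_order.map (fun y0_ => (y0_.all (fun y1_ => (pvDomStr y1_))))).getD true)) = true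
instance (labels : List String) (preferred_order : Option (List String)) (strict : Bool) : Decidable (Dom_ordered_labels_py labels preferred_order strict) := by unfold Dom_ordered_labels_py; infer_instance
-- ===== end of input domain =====

-- B replaces A's two quadratic membership-scanning loops by first-occurrence index dicts plus one
-- sort of the unique labels by an encoded (preferred-rank, first-occurrence) key.

-- ===== PORT A =====
def ordered_labels_py (labels : List String) (preferred_order : Option (List String)) (strict : Bool) : List String :=
  let preferred := preferred_order.getD []   -- `preferred_order or []`
  let ordered := preferred.foldl
    (fun ordered v => if labels.contains v && !ordered.contains v then ordered ++ [v] else ordered)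
    ([] : List String)
  if !strict then
    labels.foldl (fun ordered v => if !ordered.contains v then ordered ++ [v] else ordered) ordered
  else ordered

-- ===== PORT B =====
-- the two `for i, v in enumerate(...): if v not in d: d[v] = i` loops of Source B
def pvFirstIdx : List String → Int → PySem.Dict String Int → PySem.Dict String Int
  | [], _, d => d
  | v :: t, i, d => pvFirstIdx t (i + 1) (if d.contains v then d else d.insert v i)

def ordered_labels_py_alt (labels : List String) (preferred_order : Option (List String)) (strict : Bool) : List String :=
  let preferred := preferred_order.getD []
  let rank := pvFirstIdx preferred 0 PySem.Dict.empty
  let first := pvFirstIdx labels 0 PySem.Dict.empty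
  let P : Int := preferred.length
  let n : Int := labels.length
  let candidates := first.keys.filter (fun v => !strict || rank.contains v)
  -- first.getD v 0 is only applied to keys of `first`, where Python's first[v] is defined
  PySem.List.sorted candidates (fun v => rank.getD v P * n + first.getD v 0) false

-- ===== PRECONDITION & SPEC =====
def Spec_ordered_labels_py (labels : List String) (preferred_order : Option (List String)) (strict : Bool) (out : List String) : Prop := out = ordered_labels_py_alt labels preferred_order strict
instance (labels : List String) (preferred_order : Option (List String)) (strict : Bool) (out : List String) : Decidable (Spec_ordered_labels_py labels preferred_order strict out) := by unfold Spec_ordered_labels_py; infer_instance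

-- ===== CLAIM (what is proved, stated in full; the proofs are below) =====
def Claim_equal_ordered_labels_py : Prop := ∀ (labels : List String) (preferred_order : Option (List String)) (strict : Bool), Dom_ordered_labels_py labels preferred_order strict → Spec_ordered_labels_py labels preferred_order strict (ordered_labels_py labels preferred_order strict)

-- ===== LEMMAS AND PROOFS =====

-- first occurrences of xs (satisfying p) not yet in `seen`, in order: the shape of A's loops
def pvNew (p : String → Bool) : List String → List String → List String
  | [], _ => []
  | v :: t, seen => if p v && !seen.contains v then v :: pvNew p t (v :: seen) else pvNew p t seen

lemma pvNew_congr (p : String → Bool) (xs : List String) : ∀ s1 s2 : List String,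
    (∀ x, x ∈ s1 ↔ x ∈ s2) → pvNew p xs s1 = pvNew p xs s2 := by
  induction xs with
  | nil => intro s1 s2 _; rfl
  | cons v t ih =>
    intro s1 s2 h
    simp only [pvNew, List.contains_eq_mem, h v]
    split_ifs with hc
    · exact congrArg _ (ih _ _ (by intro x; simp [h x]))
    · exact ih _ _ h

lemma foldA (p : String → Bool) (xs : List String) : ∀ acc : List String,
    xs.foldl (fun ord v => if p v && !ord.contains v then ord ++ [v] else ord) acc
      = acc ++ pvNew p xs acc := by
  induction xs with
  | nil => intro acc; simp [pvNew]
  | cons v t ih =>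
    intro acc
    simp only [List.foldl_cons, pvNew]
    split_ifs with hc
    · rw [ih (acc ++ [v]),
        pvNew_congr p t (acc ++ [v]) (v :: acc) (by intro x; simp; tauto)]
      simp
    · exact ih acc

lemma mem_pvNew (p : String → Bool) (xs : List String) : ∀ (seen : List String) (x : String),
    x ∈ pvNew p xs seen ↔ x ∈ xs ∧ p x = true ∧ x ∉ seen := by
  induction xs with
  | nil => intro seen x; simp [pvNew]
  | cons v t ih =>
    intro seen x
    simp only [pvNew]
    split_ifs with hc
    · simp only [List.mem_cons, ih (v :: seen) x]
      simp only [Bool.and_eq_true, Bool.not_eq_true', List.contains_eq_mem,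
        decide_eq_false_iff_not] at hc
      by_cases hxv : x = v
      · subst hxv; simp [hc.1, hc.2]
      · simp [hxv]
    · rw [ih seen x]
      simp only [Bool.and_eq_true, Bool.not_eq_true', List.contains_eq_mem,
        decide_eq_false_iff_not, not_and, not_not] at hc
      simp only [List.mem_cons]
      by_cases hxv : x = v
      · subst hxv
        by_cases hpv : p x = true
        · simp [hpv, hc hpv]
        · simp [hpv]
      · simp [hxv]

lemma nodup_pvNew (p : String → Bool) (xs : List String) : ∀ seen : List String,
    (pvNew p xs seen).Nodup := by
  induction xs with
  | nil => intro seen; simp [pvNew]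
  | cons v t ih =>
    intro seen
    simp only [pvNew]
    split_ifs with hc
    · refine List.Nodup.cons ?_ (ih (v :: seen))
      intro h
      exact ((mem_pvNew p t (v :: seen) v).mp h).2.2 List.mem_cons_self
    · exact ih seen

lemma pairwise_pvNew (p : String → Bool) : ∀ (xs seen : List String),
    (pvNew p xs seen).Pairwise (fun a b => List.idxOf a xs < List.idxOf b xs) := by
  intro xs
  induction xs with
  | nil => intro seen; simp [pvNew]
  | cons v t ih =>
    intro seen
    simp only [pvNew]
    split_ifs with hc
    · refine List.Pairwise.cons ?_ ?_
      · intro b hb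
        have hbt := (mem_pvNew p t (v :: seen) b).mp hb
        have hbv : b ≠ v := fun h => hbt.2.2 (h ▸ List.mem_cons_self)
        rw [List.idxOf_cons_self, List.idxOf_cons_ne t hbv.symm]
        exact Nat.succ_pos _
      · refine (ih (v :: seen)).imp_of_mem ?_
        intro a b ha hb hlt
        have hav : a ≠ v := fun h => ((mem_pvNew p t (v :: seen) a).mp ha).2.2 (h ▸ List.mem_cons_self)
        have hbv : b ≠ v := fun h => ((mem_pvNew p t (v :: seen) b).mp hb).2.2 (h ▸ List.mem_cons_self)
        rw [List.idxOf_cons_ne t hav.symm, List.idxOf_cons_ne t hbv.symm]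
        exact Nat.succ_lt_succ hlt
    · refine (ih seen).imp_of_mem ?_
      intro a b ha hb hlt
      simp only [Bool.and_eq_true, Bool.not_eq_true', List.contains_eq_mem,
        decide_eq_false_iff_not, not_and, not_not] at hc
      have hne : ∀ x, x ∈ pvNew p t seen → x ≠ v := by
        intro x hx h
        have hm := (mem_pvNew p t seen x).mp hx
        subst h
        by_cases hpv : p x = true
        · exact hm.2.2 (hc hpv)
        · exact hpv hm.2.1
      rw [List.idxOf_cons_ne t (hne a ha).symm, List.idxOf_cons_ne t (hne b hb).symm]
      exact Nat.succ_lt_succ hlt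

lemma keys_pvFirstIdx : ∀ (xs : List String) (i : Int) (d : PySem.Dict String Int),
    (pvFirstIdx xs i d).keys = d.keys ++ pvNew (fun _ => true) xs d.keys := by
  intro xs
  induction xs with
  | nil => intro i d; simp [pvFirstIdx, pvNew]
  | cons v t ih =>
    intro i d
    simp only [pvFirstIdx, pvNew, Bool.true_and, Bool.not_eq_eq_eq_not, Bool.not_true]
    by_cases hc : d.contains v = true
    · rw [if_pos hc, ih]
      have : (d.keys.contains v = false) = False := by
        simp [List.contains_eq_mem, (PySem.Dict.contains_iff_mem_keys d v).mp hc]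
      simp [List.contains_eq_mem, (PySem.Dict.contains_iff_mem_keys d v).mp hc]
    · rw [if_neg hc, ih]
      have hkeys := PySem.Dict.keys_insert_of_not_contains d i (by simpa using hc)
      have hnm : v ∉ d.keys := fun h => hc ((PySem.Dict.contains_iff_mem_keys d v).mpr h)
      rw [hkeys, pvNew_congr (fun _ => true) t (d.keys ++ [v]) (v :: d.keys) (by intro x; simp; tauto)]
      simp [List.contains_eq_mem, hnm]

lemma contains_pvFirstIdx (xs : List String) (i : Int) (d : PySem.Dict String Int) (v : String) :
    (pvFirstIdx xs i d).contains v = true ↔ (d.contains v = true ∨ v ∈ xs) := by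
  rw [PySem.Dict.contains_iff_mem_keys, keys_pvFirstIdx]
  simp only [List.mem_append, mem_pvNew]
  rw [PySem.Dict.contains_iff_mem_keys]
  by_cases h : v ∈ d.keys <;> simp [h]

lemma getD_pvFirstIdx : ∀ (xs : List String) (i : Int) (d : PySem.Dict String Int) (v : String) (dflt : Int),
    (pvFirstIdx xs i d).getD v dflt =
      if d.contains v then d.getD v dflt
      else if v ∈ xs then i + (List.idxOf v xs : Int) else dflt := by
  intro xs
  induction xs with
  | nil =>
    intro i d v dflt
    simp only [pvFirstIdx, List.not_mem_nil, if_false]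
    by_cases h : d.contains v = true
    · rw [if_pos h]
    · rw [if_neg h, PySem.Dict.getD_of_not_contains d dflt (by simpa using h)]
  | cons w t ih =>
    intro i d v dflt
    simp only [pvFirstIdx]
    by_cases hcw : d.contains w = true
    · rw [if_pos hcw, ih]
      by_cases hcv : d.contains v = true
      · simp only [if_pos hcv]
      · have hvw : v ≠ w := fun h => hcv (h ▸ hcw)
        simp only [if_neg hcv]
        by_cases hvt : v ∈ t
        · rw [if_pos hvt, if_pos (List.mem_cons_of_mem w hvt), List.idxOf_cons_ne t (Ne.symm hvw)]
          push_cast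
          ring
        · rw [if_neg hvt, if_neg (by simp [hvw, hvt])]
    · rw [if_neg hcw, ih]
      by_cases hvw : v = w
      · subst hvw
        rw [if_pos (by simp),
          PySem.Dict.getD_insert, if_pos rfl,
          if_neg hcw, if_pos List.mem_cons_self, List.idxOf_cons_self]
        simp
      · rw [PySem.Dict.contains_insert, PySem.Dict.getD_insert, if_neg hvw]
        have hcc : (v == w || d.contains v) = d.contains v := by simp [hvw]
        rw [hcc]
        by_cases hcv : d.contains v = true
        · simp only [if_pos hcv]
        · simp only [if_neg hcv]
          by_cases hvt : v ∈ t
          · rw [if_pos hvt, if_pos (List.mem_cons_of_mem w hvt), List.idxOf_cons_ne t (Ne.symm hvw)]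
            push_cast
            ring
          · rw [if_neg hvt, if_neg (by simp [hvw, hvt])]

lemma pvKeyLt {ra rb fa fb n : Int} (h1 : ra < rb) (h2 : 0 ≤ fa) (h3 : fa < n) (h4 : 0 ≤ fb) :
    ra * n + fa < rb * n + fb := by nlinarith

-- ===== VERDICT (by name: the statement is the Claim_ definition above) =====
theorem ordered_labels_py_spec : Claim_equal_ordered_labels_py := by
  intro labels preferred_order strict _
  unfold Spec_ordered_labels_py ordered_labels_py ordered_labels_py_alt
  set pref := preferred_order.getD [] with hpref
  set P : Int := (pref.length : Int) with hP
  set n : Int := (labels.length : Int) with hn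
  set p1 : String → Bool := fun v => labels.contains v with hp1
  set N1 := pvNew p1 pref [] with hN1
  have hA1 := foldA (fun v => labels.contains v) pref []
  simp only [List.nil_append] at hA1
  rw [← hp1, ← hN1] at hA1
  -- characterise B's dicts
  have hrankD : ∀ v, (pvFirstIdx pref 0 PySem.Dict.empty).getD v P
      = if v ∈ pref then (List.idxOf v pref : Int) else P := by
    intro v
    rw [getD_pvFirstIdx, if_neg (by simp [PySem.Dict.contains_empty])]
    simp
  have hfirstD : ∀ v, (pvFirstIdx labels 0 PySem.Dict.empty).getD v 0
      = if v ∈ labels then (List.idxOf v labels : Int) else 0 := by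
    intro v
    rw [getD_pvFirstIdx, if_neg (by simp [PySem.Dict.contains_empty])]
    simp
  have hrankC : ∀ v, (pvFirstIdx pref 0 PySem.Dict.empty).contains v = true ↔ v ∈ pref := by
    intro v
    rw [contains_pvFirstIdx]
    simp [PySem.Dict.contains_empty]
  have hfkeys : (pvFirstIdx labels 0 PySem.Dict.empty).keys = pvNew (fun _ => true) labels [] := by
    rw [keys_pvFirstIdx]; simp [PySem.Dict.keys_empty]
  set key : String → Int := fun v =>
    (pvFirstIdx pref 0 PySem.Dict.empty).getD v P * n + (pvFirstIdx labels 0 PySem.Dict.empty).getD v 0 with hkey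
  have hmemN1 : ∀ x, x ∈ N1 ↔ x ∈ pref ∧ x ∈ labels := by
    intro x
    rw [hN1, mem_pvNew]
    simp [hp1, List.contains_eq_mem]
  have hkeyN1lt : N1.Pairwise (fun a b => key a < key b) := by
    refine (pairwise_pvNew p1 pref []).imp_of_mem ?_
    intro a b ha hb hlt
    have hma := (hmemN1 a).mp (hN1 ▸ ha)
    have hmb := (hmemN1 b).mp (hN1 ▸ hb)
    simp only [hkey, hrankD, hfirstD, if_pos hma.1, if_pos hmb.1, if_pos hma.2, if_pos hmb.2]
    refine pvKeyLt (by exact_mod_cast hlt) (Int.natCast_nonneg _) ?_ (Int.natCast_nonneg _)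
    rw [hn]
    exact_mod_cast List.idxOf_lt_length_of_mem hma.2
  cases strict with
  | true =>
    simp only [Bool.not_true, Bool.false_or]
    rw [if_neg (by simp), hA1]
    refine (PySem.List.sorted_eq_of_perm_of_pairwise_lt _ _ key ?_ ?_).symm
    · refine (List.perm_ext_iff_of_nodup (by rw [hN1]; exact nodup_pvNew p1 pref []) ?_).mpr ?_
      · rw [hfkeys]
        exact (nodup_pvNew _ labels []).filter _
      · intro x
        rw [hmemN1, List.mem_filter, hfkeys, mem_pvNew]
        simp only [List.not_mem_nil, not_false_iff, and_true]
        rw [hrankC x]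
        tauto
    · exact hkeyN1lt
  | false =>
    simp only [Bool.not_false, Bool.true_or]
    rw [if_pos (by simp)]
    have h2step : (fun (ord : List String) v => if !ord.contains v then ord ++ [v] else ord)
        = (fun (ord : List String) v => if true && !ord.contains v then ord ++ [v] else ord) := by
      funext ord v; simp
    rw [h2step, hA1]
    set N2 := pvNew (fun _ : String => true) labels N1 with hN2
    have hA2 := foldA (fun _ : String => true) labels N1
    rw [← hN2] at hA2
    rw [hA2]
    have hmemN2 : ∀ x, x ∈ N2 ↔ x ∈ labels ∧ x ∉ N1 := by
      intro x
      rw [hN2, mem_pvNew]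
      simp
    refine (PySem.List.sorted_eq_of_perm_of_pairwise_lt _ _ key ?_ ?_).symm
    · refine (List.perm_ext_iff_of_nodup ?_ ?_).mpr ?_
      · refine List.Nodup.append (by rw [hN1]; exact nodup_pvNew p1 pref []) (by rw [hN2]; exact nodup_pvNew _ labels N1) ?_
        intro x hx1 hx2
        exact ((hmemN2 x).mp hx2).2 hx1
      · rw [hfkeys]
        exact (nodup_pvNew _ labels []).filter _
      · intro x
        simp only [List.mem_append, hmemN1, hmemN2, List.mem_filter, hfkeys, mem_pvNew]
        simp only [List.not_mem_nil, not_false_iff, and_true]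
        constructor
        · rintro (⟨_, h⟩ | ⟨h, _⟩) <;> exact h
        · intro h
          by_cases hx1 : x ∈ N1
          · exact Or.inl ((hmemN1 x).mp hx1)
          · exact Or.inr ⟨h, fun hc => hx1 ((hmemN1 x).mpr hc)⟩
    · rw [List.pairwise_append]
      refine ⟨hkeyN1lt, ?_, ?_⟩
      · rw [hN2]
        refine ((pairwise_pvNew (fun _ => true) labels N1).imp_of_mem ?_)
        intro a b ha hb hlt
        have hma := (hmemN2 a).mp ((by rw [hN2]; exact ha) : a ∈ N2)
        have hmb := (hmemN2 b).mp ((by rw [hN2]; exact hb) : b ∈ N2)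
        have hpa : a ∉ pref := fun h => hma.2 ((hmemN1 a).mpr ⟨h, hma.1⟩)
        have hpb : b ∉ pref := fun h => hmb.2 ((hmemN1 b).mpr ⟨h, hmb.1⟩)
        simp only [hkey, hrankD, hfirstD, if_neg hpa, if_neg hpb, if_pos hma.1, if_pos hmb.1]
        have : (List.idxOf a labels : Int) < (List.idxOf b labels : Int) := by exact_mod_cast hlt
        omega
      · intro a ha b hb
        have hma := (hmemN1 a).mp ha
        have hmb := (hmemN2 b).mp hb
        have hpb : b ∉ pref := fun h => hmb.2 ((hmemN1 b).mpr ⟨h, hmb.1⟩)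
        simp only [hkey, hrankD, hfirstD, if_pos hma.1, if_pos hma.2, if_neg hpb, if_pos hmb.1]
        refine pvKeyLt ?_ (Int.natCast_nonneg _) ?_ (Int.natCast_nonneg _)
        · rw [hP]
          exact_mod_cast List.idxOf_lt_length_of_mem hma.1
        · rw [hn]
          exact_mod_cast List.idxOf_lt_length_of_mem hma.2
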